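-- pv_equiv track=rewrite | github.com/StraightOuttaCrompton/EnigmaPython | EnigmaNew.py | rotateRotors
-- ===== SOURCE A (Python) =====
-- alphabetLength = 26
--
-- def rotateRotors(rotorArray):
--     rotorArray[0] += 1
--     rotorArray[0] = rotorArray[0] % alphabetLength
--
--     if(len(rotorArray) == 1):
--         return rotorArray
--
--     elif(rotorArray[0] == 0):
--         rotorArray.pop(0)
--         rotorArray = rotateRotors(rotorArray)
--         rotorArray.insert(0, 0)
--         return rotorArray
--     else:
--         return rotorArray
-- ===== SOURCE B (Python) =====
-- alphabetLength = 26
--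
-- def rotateRotors(rotorArray):
--     i = 0
--     while True:
--         rotorArray[i] = (rotorArray[i] + 1) % alphabetLength
--         if i == len(rotorArray) - 1 or rotorArray[i] != 0:
--             return rotorArray
--         i += 1
-- ===== Notes on version B (the rewrite author's own statement) =====
-- stated objective: idiomatic
-- what changed: Replaces the pop/recurse/insert(0,0) recursion with a flat in-place carry loop over an index, like an odometer.
import Mathlib
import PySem

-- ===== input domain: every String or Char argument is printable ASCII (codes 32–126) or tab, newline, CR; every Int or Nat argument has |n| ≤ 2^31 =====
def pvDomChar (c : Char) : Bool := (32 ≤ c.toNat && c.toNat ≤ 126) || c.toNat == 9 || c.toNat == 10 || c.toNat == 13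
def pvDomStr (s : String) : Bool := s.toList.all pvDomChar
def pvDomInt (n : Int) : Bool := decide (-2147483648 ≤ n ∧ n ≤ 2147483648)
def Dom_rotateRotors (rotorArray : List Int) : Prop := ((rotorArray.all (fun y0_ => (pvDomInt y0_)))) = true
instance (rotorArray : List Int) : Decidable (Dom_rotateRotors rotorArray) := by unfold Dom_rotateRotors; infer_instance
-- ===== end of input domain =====

-- B replaces A's pop/recurse/insert(0,0) recursion with a flat in-place carry loop (odometer);
-- equivalence is about the RETURN value (both Pythons also mutate the argument identically).

-- ===== PORT A =====
-- A: increment head mod 26; if singleton return; if head wrapped to 0, recurse on the tail and re-prepend 0.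
def rotateRotors (rotorArray : List Int) : List Int :=
  match rotorArray with
  | [] => []  -- unreachable: Python raises IndexError here; excluded by Pre_
  | x :: rest =>
    let x' := PySem.Int.mod (x + 1) 26
    if rest = [] then [x']
    else if x' = 0 then 0 :: rotateRotors rest
    else x' :: rest

-- ===== PORT B =====
-- B's while-loop: `done` is the already-processed prefix (indices < i), `rest` starts at index i.
def rotateRotorsAltLoop (done : List Int) (rest : List Int) : List Int :=
  match rest with
  | [] => done  -- unreachable under Pre_
  | x :: xs =>
    let x' := PySem.Int.mod (x + 1) 26
    if xs = [] ∨ x' ≠ 0 then done ++ (x' :: xs)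
    else rotateRotorsAltLoop (done ++ [x']) xs

def rotateRotors_alt (rotorArray : List Int) : List Int :=
  rotateRotorsAltLoop [] rotorArray

-- ===== PRECONDITION & SPEC =====
-- Pre_ excludes only the empty list, on which Python A raises IndexError.
def Pre_rotateRotors (rotorArray : List Int) : Prop := rotorArray ≠ []
instance (rotorArray : List Int) : Decidable (Pre_rotateRotors rotorArray) := by unfold Pre_rotateRotors; infer_instance
def pvWitness_rotateRotors : List Int := [25, 3]

def Spec_rotateRotors (rotorArray : List Int) (out : List Int) : Prop := out = rotateRotors_alt rotorArray
instance (rotorArray : List Int) (out : List Int) : Decidable (Spec_rotateRotors rotorArray out) := by unfold Spec_rotateRotors; infer_instance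

-- ===== CLAIM (what is proved, stated in full; the proofs are below) =====
def Claim_equal_rotateRotors : Prop := ∀ (rotorArray : List Int), Dom_rotateRotors rotorArray → Pre_rotateRotors rotorArray → Spec_rotateRotors rotorArray (rotateRotors rotorArray)

-- ===== LEMMAS AND PROOFS =====
theorem rotateRotorsAltLoop_eq (rest : List Int) (hrest : rest ≠ []) :
    ∀ done : List Int, rotateRotorsAltLoop done rest = done ++ rotateRotors rest := by
  induction rest with
  | nil => exact absurd rfl hrest
  | cons x xs ih =>
    intro done
    have hA : rotateRotors (x :: xs) =
        (if xs = [] then [PySem.Int.mod (x+1) 26] else if PySem.Int.mod (x+1) 26 = 0 then 0 :: rotateRotors xs else PySem.Int.mod (x+1) 26 :: xs) := rfl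
    have hB : rotateRotorsAltLoop done (x :: xs) =
        (if xs = [] ∨ PySem.Int.mod (x+1) 26 ≠ 0 then done ++ (PySem.Int.mod (x+1) 26 :: xs) else rotateRotorsAltLoop (done ++ [PySem.Int.mod (x+1) 26]) xs) := rfl
    rw [hA, hB]
    by_cases hxs : xs = []
    · rw [if_pos (Or.inl hxs), if_pos hxs, hxs]
    · by_cases hz : PySem.Int.mod (x + 1) 26 = 0
      · rw [if_neg (by rw [not_or, not_ne_iff]; exact ⟨hxs, hz⟩), if_neg hxs, if_pos hz, ih hxs, hz]
        simp
      · rw [if_pos (Or.inr hz), if_neg hxs, if_neg hz]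

-- ===== VERDICT (by name: the statement is the Claim_ definition above) =====
theorem rotateRotors_spec : Claim_equal_rotateRotors := by
  intro l _ hpre
  unfold Spec_rotateRotors rotateRotors_alt
  rw [rotateRotorsAltLoop_eq l hpre]
  simp
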